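-- pv_equiv track=rewrite | github.com/kenkov/mod_depgen | depgen_search.py | _mkpair
-- ===== SOURCE A (Python) =====
-- def _mkpair(lst, deplst):
--     ans = set()
--     for ind, pair1 in enumerate(lst):
--         for pair2 in deplst:
--             s = set(pair1).intersection(pair2)
--             if s and s != set(pair2):
--                 a = tuple(sorted(set(pair1).union(pair2)))
--                 ans.add(a)
--     return ans
-- ===== SOURCE B (Python) =====
-- def _mkpair(lst, deplst):
--     # Inverted index: element -> indices of deplst entries containing it.
--     index = {}
--     for j, pair2 in enumerate(deplst):
--         for e in set(pair2):
--             index.setdefault(e, []).append(j)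
--     ans = set()
--     for pair1 in lst:
--         s1 = set(pair1)
--         cand = set()
--         for e in s1:
--             cand.update(index.get(e, []))
--         for j in sorted(cand):
--             pair2 = deplst[j]
--             if any(e not in s1 for e in pair2):
--                 ans.add(tuple(sorted(s1.union(pair2))))
--     return ans
-- ===== Notes on version B (the rewrite author's own statement) =====
-- stated objective: alternative
-- what changed: B builds an inverted index from element to the deplst indices containing it, then for each pair1 scans only the (sorted) overlapping candidate indices instead of A's full scan of deplst for every pair1; it skips non-overlapping pairs but is not measurably faster on dense inputs where most pairs overlap.
import Mathlib
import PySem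

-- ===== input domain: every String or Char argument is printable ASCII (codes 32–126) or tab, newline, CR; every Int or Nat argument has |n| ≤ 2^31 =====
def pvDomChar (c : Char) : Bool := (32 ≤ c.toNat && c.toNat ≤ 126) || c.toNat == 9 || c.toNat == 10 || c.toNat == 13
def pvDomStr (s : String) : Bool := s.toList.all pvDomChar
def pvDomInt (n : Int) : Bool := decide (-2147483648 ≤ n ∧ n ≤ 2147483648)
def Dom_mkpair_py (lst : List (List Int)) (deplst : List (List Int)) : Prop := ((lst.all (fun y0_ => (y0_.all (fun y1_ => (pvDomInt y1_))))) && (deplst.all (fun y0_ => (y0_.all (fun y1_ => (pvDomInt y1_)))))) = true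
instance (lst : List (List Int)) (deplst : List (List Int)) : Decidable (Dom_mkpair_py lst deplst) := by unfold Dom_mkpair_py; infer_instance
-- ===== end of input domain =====

-- B replaces A's all-pairs scan by an inverted index (element -> deplst indices), so each pair1 only
-- visits the deplst entries that actually share an element with it (alternative algorithm).

-- ===== PORT A =====
def mkpair_py (lst : List (List Int)) (deplst : List (List Int)) : List (List Int) :=
  (PySem.List.enumerate lst).foldl (fun ans ip =>
    deplst.foldl (fun ans pair2 =>
      let s := PySem.Set.inter (PySem.Set.ofList ip.2) pair2
      if !s.isEmpty && !PySem.Set.equal s (PySem.Set.ofList pair2) then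
        PySem.Set.add ans (PySem.List.sorted (PySem.Set.union (PySem.Set.ofList ip.2) pair2) (fun x => x))
      else ans) ans) PySem.Set.empty

-- ===== PORT B =====
-- inverted index: element -> list of indices j of deplst entries whose set contains it (increasing j)
def pvIndexB (deplst : List (List Int)) : PySem.Dict Int (List Int) :=
  (PySem.List.enumerate deplst).foldl (fun d jp =>
    (PySem.Set.ofList jp.2).foldl (fun d e => d.modify e [] (· ++ [jp.1])) d) PySem.Dict.empty

def mkpair_py_alt (lst : List (List Int)) (deplst : List (List Int)) : List (List Int) :=
  let index := pvIndexB deplst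
  lst.foldl (fun ans pair1 =>
    let s1 := PySem.Set.ofList pair1
    let cand := s1.foldl (fun c e => PySem.Set.update c (index.getD e [])) PySem.Set.empty
    (PySem.List.sorted cand (fun x => x)).foldl (fun ans j =>
      let pair2 := PySem.List.pyGetD deplst j []
      if pair2.any (fun e => !(s1.contains e)) then
        PySem.Set.add ans (PySem.List.sorted (s1.union pair2) (fun x => x))
      else ans) ans) PySem.Set.empty

-- ===== PRECONDITION & SPEC =====
def Spec_mkpair_py (lst : List (List Int)) (deplst : List (List Int)) (out : List (List Int)) : Prop := out = mkpair_py_alt lst deplst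
instance (lst : List (List Int)) (deplst : List (List Int)) (out : List (List Int)) : Decidable (Spec_mkpair_py lst deplst out) := by unfold Spec_mkpair_py; infer_instance

-- ===== CLAIM (what is proved, stated in full; the proofs are below) =====
def Claim_equal_mkpair_py : Prop := ∀ (lst : List (List Int)) (deplst : List (List Int)), Dom_mkpair_py lst deplst → Spec_mkpair_py lst deplst (mkpair_py lst deplst)

-- ===== LEMMAS AND PROOFS =====

-- dropping the unused enumerate index from a fold
theorem pv_foldl_enumerate_snd {α β : Type} (xs : List α) (s : Int) (h : β → α → β) (init : β) :
    (PySem.List.enumerate xs s).foldl (fun a jp => h a jp.2) init = xs.foldl h init := by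
  induction xs generalizing s init with
  | nil => rfl
  | cons x xs ih => simpa [PySem.List.enumerate_cons] using ih (s + 1) (h init x)

-- the flat element/index pair list behind the inverted index
def pvPairs (deplst : List (List Int)) : List (Int × Int) :=
  (PySem.List.enumerate deplst).flatMap (fun jp => (PySem.Set.ofList jp.2).map (fun e => (e, jp.1)))

theorem pvIndexB_eq_flat (deplst : List (List Int)) :
    pvIndexB deplst = (pvPairs deplst).foldl (fun d p => d.modify p.1 [] (· ++ [p.2])) PySem.Dict.empty := by
  rw [pvIndexB, pvPairs, List.foldl_flatMap]
  simp [List.foldl_map]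

theorem pv_mem_index (deplst : List (List Int)) (e j : Int) :
    j ∈ (pvIndexB deplst).getD e [] ↔ ∃ k, ∃ _ : k < deplst.length, j = (k : Int) ∧ e ∈ deplst[k] := by
  rw [pvIndexB_eq_flat, PySem.Dict.getD_foldl_modify_append, PySem.Dict.getD_empty]
  simp only [List.nil_append, List.mem_map, List.mem_filter, pvPairs, List.mem_flatMap,
    PySem.List.mem_enumerate_iff, beq_iff_eq]
  constructor
  · rintro ⟨a, ⟨⟨jp, ⟨k, hk, rfl⟩, x, hx, rfl⟩, heq⟩, hj⟩
    simp only at heq hj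
    refine ⟨k, hk, by omega, ?_⟩
    rw [← heq]
    exact (PySem.Set.mem_ofList _ _).1 hx
  · rintro ⟨k, hk, rfl, he⟩
    exact ⟨(e, (k : Int)), ⟨⟨((0 : Int) + (k : Int), deplst[k]), ⟨k, hk, rfl⟩,
      e, (PySem.Set.mem_ofList _ _).2 he, by simp⟩, rfl⟩, rfl⟩

theorem pv_mem_foldl_update (l : List Int) (s : PySem.Set Int) (g : Int → List Int) (y : Int) :
    y ∈ l.foldl (fun c e => PySem.Set.update c (g e)) s ↔ y ∈ s ∨ ∃ e ∈ l, y ∈ g e := by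
  induction l generalizing s with
  | nil => simp
  | cons a l ih =>
    simp only [List.foldl_cons, ih, PySem.Set.mem_update, List.mem_cons]
    constructor
    · rintro ((h | h) | ⟨e, he, hy⟩)
      · exact Or.inl h
      · exact Or.inr ⟨a, Or.inl rfl, h⟩
      · exact Or.inr ⟨e, Or.inr he, hy⟩
    · rintro (h | ⟨e, (rfl | he), hy⟩)
      · exact Or.inl (Or.inl h)
      · exact Or.inl (Or.inr hy)
      · exact Or.inr ⟨e, he, hy⟩

theorem pv_nodup_foldl_update (l : List Int) (s : PySem.Set Int) (g : Int → List Int) (h : s.Nodup) :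
    (l.foldl (fun c e => PySem.Set.update c (g e)) s).Nodup := by
  induction l generalizing s with
  | nil => exact h
  | cons a l ih => exact ih _ (PySem.Set.nodup_update _ _ h)

theorem pv_enumerate_pairwise {α : Type} (xs : List α) (s : Int) :
    (PySem.List.enumerate xs s).Pairwise (fun a b => a.1 < b.1) := by
  induction xs generalizing s with
  | nil => simp [PySem.List.enumerate]
  | cons x xs ih =>
    rw [PySem.List.enumerate_cons]
    refine List.Pairwise.cons ?_ (ih (s + 1))
    intro b hb
    obtain ⟨k, hk, rfl⟩ := (PySem.List.mem_enumerate_iff _ _ _).1 hb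
    simp only
    omega

-- the sorted candidate list IS the increasing list of overlapping deplst indices
theorem pv_sorted_cand (deplst : List (List Int)) (p1 : List Int) :
    PySem.List.sorted ((PySem.Set.ofList p1).foldl
        (fun c e => PySem.Set.update c ((pvIndexB deplst).getD e [])) PySem.Set.empty) (fun x => x)
      = ((PySem.List.enumerate deplst).filter (fun jp => jp.2.any (fun e => p1.contains e))).map (·.1) := by
  have hpw : (((PySem.List.enumerate deplst).filter
      (fun jp => jp.2.any (fun e => p1.contains e))).map (·.1)).Pairwise (fun a b => a < b) :=
    List.pairwise_map.2 ((pv_enumerate_pairwise deplst 0).filter _)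
  refine PySem.List.sorted_eq_of_perm_of_pairwise_lt _ _ _ ?_ hpw
  refine (List.perm_ext_iff_of_nodup (hpw.imp ne_of_lt)
    (pv_nodup_foldl_update (PySem.Set.ofList p1) PySem.Set.empty
      (fun e => (pvIndexB deplst).getD e []) List.nodup_nil)).2 ?_
  intro j
  rw [pv_mem_foldl_update]
  simp only [List.mem_map, List.mem_filter, PySem.List.mem_enumerate_iff,
    List.any_eq_true, List.contains_eq_mem, decide_eq_true_eq]
  constructor
  · rintro ⟨jp, ⟨⟨k, hk, rfl⟩, e, he, hep⟩, rfl⟩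
    refine Or.inr ⟨e, (PySem.Set.mem_ofList _ _).2 hep, ?_⟩
    rw [pv_mem_index]
    exact ⟨k, hk, by omega, he⟩
  · rintro (h | ⟨e, he, hj⟩)
    · simp [PySem.Set.empty] at h
    · rw [pv_mem_index] at hj
      obtain ⟨k, hk, rfl, hek⟩ := hj
      exact ⟨((0 : Int) + (k : Int), deplst[k]), ⟨⟨k, hk, rfl⟩, e, hek,
        (PySem.Set.mem_ofList _ _).1 he⟩, by simp⟩

-- A's test "s and s != set(pair2)" expressed through B's two membership tests, on one pair2
theorem pv_step (p1 pair2 : List Int) (ans : PySem.Set (List Int)) :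
    (if !(PySem.Set.inter (PySem.Set.ofList p1) pair2).isEmpty &&
        !PySem.Set.equal (PySem.Set.inter (PySem.Set.ofList p1) pair2) (PySem.Set.ofList pair2) then
       PySem.Set.add ans (PySem.List.sorted (PySem.Set.union (PySem.Set.ofList p1) pair2) (fun x => x))
     else ans)
    = (if pair2.any (fun e => p1.contains e) then
         if pair2.any (fun e => !((PySem.Set.ofList p1).contains e)) then
           PySem.Set.add ans (PySem.List.sorted ((PySem.Set.ofList p1).union pair2) (fun x => x))
         else ans
       else ans) := by
  have hmem : ∀ y, y ∈ PySem.Set.inter (PySem.Set.ofList p1) pair2 ↔ y ∈ p1 ∧ y ∈ pair2 := by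
    intro y
    rw [PySem.Set.mem_inter, PySem.Set.mem_ofList]
  by_cases hov : ∃ e ∈ pair2, e ∈ p1
  · have hne : (PySem.Set.inter (PySem.Set.ofList p1) pair2).isEmpty = false := by
      obtain ⟨e, he, hep⟩ := hov
      rcases h : (PySem.Set.inter (PySem.Set.ofList p1) pair2).isEmpty with _ | _
      · rfl
      · rw [List.isEmpty_iff] at h
        exact absurd ((hmem e).2 ⟨hep, he⟩) (by simp [h])
    have hov' : pair2.any (fun e => p1.contains e) = true := by
      simpa [List.any_eq_true, List.contains_eq_mem] using hov
    by_cases hsub : ∀ e ∈ pair2, e ∈ p1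
    · have heq : PySem.Set.equal (PySem.Set.inter (PySem.Set.ofList p1) pair2) (PySem.Set.ofList pair2) = true := by
        rw [PySem.Set.equal_iff]
        intro x
        rw [hmem, PySem.Set.mem_ofList]
        exact ⟨fun h => h.2, fun h => ⟨hsub x h, h⟩⟩
      have hno : pair2.any (fun e => !((PySem.Set.ofList p1).contains e)) = false := by
        simp only [List.any_eq_false, Bool.not_eq_true']
        intro e he
        rw [Bool.not_eq_false, PySem.Set.contains_iff, PySem.Set.mem_ofList]
        exact hsub e he
      rw [hne, heq, hov', hno]
      simp
    · have heq : PySem.Set.equal (PySem.Set.inter (PySem.Set.ofList p1) pair2) (PySem.Set.ofList pair2) = false := by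
        push Not at hsub
        obtain ⟨e, he, hep⟩ := hsub
        rcases h : PySem.Set.equal (PySem.Set.inter (PySem.Set.ofList p1) pair2) (PySem.Set.ofList pair2) with _ | _
        · rfl
        · rw [PySem.Set.equal_iff] at h
          exact absurd (((hmem e).1 ((h e).2 ((PySem.Set.mem_ofList _ _).2 he))).1) hep
      have hyes : pair2.any (fun e => !((PySem.Set.ofList p1).contains e)) = true := by
        push Not at hsub
        obtain ⟨e, he, hep⟩ := hsub
        refine List.any_eq_true.2 ⟨e, he, ?_⟩
        have hc : (PySem.Set.ofList p1).contains e = false := by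
          rcases h : (PySem.Set.ofList p1).contains e with _ | _
          · rfl
          · exact absurd ((PySem.Set.mem_ofList _ _).1 ((PySem.Set.contains_iff _ _).1 h)) hep
        rw [hc]
        rfl
      rw [hne, heq, hov', hyes]
      simp
  · have hemp : (PySem.Set.inter (PySem.Set.ofList p1) pair2).isEmpty = true := by
      rw [List.isEmpty_iff, List.eq_nil_iff_forall_not_mem]
      intro y hy
      exact hov ⟨y, ((hmem y).1 hy).2, ((hmem y).1 hy).1⟩
    have hov' : pair2.any (fun e => p1.contains e) = false := by
      simp only [List.any_eq_false, List.contains_eq_mem, decide_eq_true_eq]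
      intro e he hep
      exact hov ⟨e, he, hep⟩
    rw [hemp, hov']
    simp

-- one pass of the outer loop: A's full inner scan = B's indexed scan
theorem pv_inner (deplst : List (List Int)) (p1 : List Int) (ans : PySem.Set (List Int)) :
    deplst.foldl (fun ans pair2 =>
      if !(PySem.Set.inter (PySem.Set.ofList p1) pair2).isEmpty &&
         !PySem.Set.equal (PySem.Set.inter (PySem.Set.ofList p1) pair2) (PySem.Set.ofList pair2) then
        PySem.Set.add ans (PySem.List.sorted (PySem.Set.union (PySem.Set.ofList p1) pair2) (fun x => x))
      else ans) ans
    = (PySem.List.sorted ((PySem.Set.ofList p1).foldl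
        (fun c e => PySem.Set.update c ((pvIndexB deplst).getD e [])) PySem.Set.empty) (fun x => x)).foldl
        (fun ans j =>
          if (PySem.List.pyGetD deplst j []).any (fun e => !((PySem.Set.ofList p1).contains e)) then
            PySem.Set.add ans (PySem.List.sorted ((PySem.Set.ofList p1).union (PySem.List.pyGetD deplst j [])) (fun x => x))
          else ans) ans := by
  rw [pv_sorted_cand, List.foldl_map]
  rw [PySem.List.foldl_congr_mem _ _ (fun ans (jp : Int × List Int) =>
      if jp.2.any (fun e => !((PySem.Set.ofList p1).contains e)) then
        PySem.Set.add ans (PySem.List.sorted ((PySem.Set.ofList p1).union jp.2) (fun x => x))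
      else ans) ans ?hcong]
  case hcong =>
    intro acc jp hjp
    obtain ⟨k, hk, rfl⟩ := (PySem.List.mem_enumerate_iff _ _ _).1 (List.mem_of_mem_filter hjp)
    have hget : PySem.List.pyGetD deplst ((0 : Int) + (k : Int), deplst[k]).1 [] = deplst[k] := by
      simp only [zero_add, PySem.List.pyGetD_natCast, List.getD_eq_getElem?_getD,
        List.getElem?_eq_getElem hk, Option.getD_some]
    rw [hget]
  rw [List.foldl_filter,
    ← pv_foldl_enumerate_snd deplst 0 (fun ans pair2 =>
      if !(PySem.Set.inter (PySem.Set.ofList p1) pair2).isEmpty &&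
         !PySem.Set.equal (PySem.Set.inter (PySem.Set.ofList p1) pair2) (PySem.Set.ofList pair2) then
        PySem.Set.add ans (PySem.List.sorted (PySem.Set.union (PySem.Set.ofList p1) pair2) (fun x => x))
      else ans) ans]
  apply PySem.List.foldl_congr_mem
  intro acc jp _
  exact pv_step p1 jp.2 acc

-- ===== VERDICT (by name: the statement is the Claim_ definition above) =====
theorem mkpair_py_spec : Claim_equal_mkpair_py := by
  intro lst deplst _
  show mkpair_py lst deplst = mkpair_py_alt lst deplst
  rw [mkpair_py, mkpair_py_alt]
  simp only []
  rw [pv_foldl_enumerate_snd lst 0 (fun ans p1 =>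
    deplst.foldl (fun ans pair2 =>
      if !(PySem.Set.inter (PySem.Set.ofList p1) pair2).isEmpty &&
         !PySem.Set.equal (PySem.Set.inter (PySem.Set.ofList p1) pair2) (PySem.Set.ofList pair2) then
        PySem.Set.add ans (PySem.List.sorted (PySem.Set.union (PySem.Set.ofList p1) pair2) (fun x => x))
      else ans) ans) PySem.Set.empty]
  apply PySem.List.foldl_congr_mem
  intro acc p1 _
  exact pv_inner deplst p1 acc
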